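-- pv_equiv track=rewrite | github.com/L3viathan/CYK | cyk.py | possibleCombs
-- ===== SOURCE A (Python) =====
-- def possibleCombs(a,b):
--     combs = []
--     for i in range(len(a)):
--         if a[i] != '-':
--             for j in range(len(b)):
--                 if b[j] != '-':
--                     add = (str(a[i]),str(b[j]))
--                     if (add not in combs):
--                         combs.append(add)
--     return combs
-- ===== SOURCE B (Python) =====
-- def possibleCombs(a, b):
--     xs = []
--     for ch in a:
--         if ch != '-':
--             s = str(ch)
--             if s not in xs:
--                 xs.append(s)
--     ys = []
--     for ch in b:
--         if ch != '-':
--             s = str(ch)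
--             if s not in ys:
--                 ys.append(s)
--     return [(x, y) for x in xs for y in ys]
-- ===== Notes on version B (the rewrite author's own statement) =====
-- stated objective: faster
-- what changed: B deduplicates each axis once (first occurrences of non-dash characters) and then emits the plain cartesian product with no membership test on the result list, instead of A's nested scans with a quadratic-growing 'not in combs' check.
import Mathlib
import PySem

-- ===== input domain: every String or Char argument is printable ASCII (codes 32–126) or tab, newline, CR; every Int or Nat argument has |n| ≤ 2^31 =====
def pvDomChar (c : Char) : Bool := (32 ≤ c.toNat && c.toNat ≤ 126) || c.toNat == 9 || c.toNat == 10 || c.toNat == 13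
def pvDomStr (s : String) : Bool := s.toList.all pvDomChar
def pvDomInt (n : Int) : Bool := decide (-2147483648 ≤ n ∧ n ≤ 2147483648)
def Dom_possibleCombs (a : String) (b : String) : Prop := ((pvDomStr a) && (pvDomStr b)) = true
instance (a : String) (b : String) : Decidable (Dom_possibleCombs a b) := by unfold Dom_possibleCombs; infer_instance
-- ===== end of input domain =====

-- B deduplicates each axis once and then emits the plain cartesian product,
-- replacing A's nested scans with a membership test on the growing result list.

-- ===== PORT A =====
-- the inner 'for j in range(len(b)): …' loop of A (sc = str(a[i]))
def pvInner (sc : String) (bs : List Char) (combs : List (String × String)) :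
    List (String × String) :=
  bs.foldl (fun combs d =>
    if d ≠ '-' then
      let add := (sc, String.ofList [d])
      if add ∉ combs then combs ++ [add] else combs
    else combs) combs

def possibleCombs (a : String) (b : String) : List (String × String) :=
  a.toList.foldl (fun combs c =>
    if c ≠ '-' then pvInner (String.ofList [c]) b.toList combs else combs) []

-- ===== PORT B =====
-- B's dedup loop: first occurrences (as 1-char strings) of the non-dash chars
def pvDed (cs : List Char) (acc : List String) : List String :=
  cs.foldl (fun acc c =>
    if c ≠ '-' then
      if String.ofList [c] ∉ acc then acc ++ [String.ofList [c]] else acc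
    else acc) acc

def possibleCombs_alt (a : String) (b : String) : List (String × String) :=
  (pvDed a.toList []).flatMap (fun x => (pvDed b.toList []).map (fun y => (x, y)))

-- ===== PRECONDITION & SPEC =====
def Spec_possibleCombs (a : String) (b : String) (out : List (String × String)) : Prop := out = possibleCombs_alt a b
instance (a : String) (b : String) (out : List (String × String)) : Decidable (Spec_possibleCombs a b out) := by unfold Spec_possibleCombs; infer_instance

-- ===== CLAIM (what is proved, stated in full; the proofs are below) =====
def Claim_equal_possibleCombs : Prop := ∀ (a : String) (b : String), Dom_possibleCombs a b → Spec_possibleCombs a b (possibleCombs a b)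

-- ===== LEMMAS AND PROOFS =====

lemma pvDed_cons (c : Char) (cs : List Char) (acc : List String) :
    pvDed (c :: cs) acc
      = pvDed cs (if c ≠ '-' then
          (if String.ofList [c] ∉ acc then acc ++ [String.ofList [c]] else acc)
        else acc) := rfl

lemma pvInner_cons (sc : String) (d : Char) (bs : List Char)
    (combs : List (String × String)) :
    pvInner sc (d :: bs) combs
      = pvInner sc bs (if d ≠ '-' then
          (if (sc, String.ofList [d]) ∉ combs
            then combs ++ [(sc, String.ofList [d])] else combs)
        else combs) := rfl

-- pvDed only ever appends to its accumulator
lemma pvDed_prefix : ∀ (cs : List Char) (acc : List String),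
    ∃ t, pvDed cs acc = acc ++ t := by
  intro cs
  induction cs with
  | nil => intro acc; exact ⟨[], by simp [pvDed]⟩
  | cons c cs ih =>
    intro acc
    by_cases hc : c = '-'
    · rw [pvDed_cons, if_neg (by simp [hc])]; exact ih acc
    · rw [pvDed_cons, if_pos hc]
      by_cases hm : String.ofList [c] ∈ acc
      · rw [if_neg (not_not_intro hm)]; exact ih acc
      · rw [if_pos hm]
        obtain ⟨t, ht⟩ := ih (acc ++ [String.ofList [c]])
        exact ⟨String.ofList [c] :: t, by simp [ht]⟩

lemma mem_pvDed_of_mem (cs : List Char) (acc : List String) (s : String)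
    (h : s ∈ acc) : s ∈ pvDed cs acc := by
  obtain ⟨t, ht⟩ := pvDed_prefix cs acc
  simp [ht, h]

lemma mem_pvDed : ∀ (cs : List Char) (acc : List String) (d : Char),
    d ∈ cs → d ≠ '-' → String.ofList [d] ∈ pvDed cs acc := by
  intro cs
  induction cs with
  | nil => intro acc d h; cases h
  | cons c cs ih =>
    intro acc d hmem hd
    rcases List.mem_cons.mp hmem with rfl | htail
    · rw [pvDed_cons, if_pos hd]
      by_cases hm : String.ofList [d] ∈ acc
      · rw [if_neg (not_not_intro hm)]; exact mem_pvDed_of_mem _ _ _ hm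
      · rw [if_pos hm]; exact mem_pvDed_of_mem _ _ _ (by simp)
    · rw [pvDed_cons]
      exact ih _ d htail hd
-- if every non-dash char of cs is already in acc, pvDed adds nothing
lemma pvDed_fixed : ∀ (cs : List Char) (acc : List String),
    (∀ d ∈ cs, d ≠ '-' → String.ofList [d] ∈ acc) → pvDed cs acc = acc := by
  intro cs
  induction cs with
  | nil => intro acc _; simp [pvDed]
  | cons c cs ih =>
    intro acc h
    by_cases hc : c = '-'
    · rw [pvDed_cons, if_neg (by simp [hc])]
      exact ih acc (fun d hd => h d (List.mem_cons_of_mem _ hd))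
    · have hm : String.ofList [c] ∈ acc := h c (List.mem_cons_self) hc
      rw [pvDed_cons, if_pos hc, if_neg (not_not_intro hm)]
      exact ih acc (fun d hd => h d (List.mem_cons_of_mem _ hd))

lemma pvDed_idem (cs : List Char) (acc : List String) :
    pvDed cs (pvDed cs acc) = pvDed cs acc :=
  pvDed_fixed cs _ (fun d hd hne => mem_pvDed cs acc d hd hne)

-- A's inner loop, started from a list whose sc-pairs are exactly those with
-- second component in `seen`, appends exactly the sc-pairs of the new dedups
lemma pvInner_eq (sc : String) : ∀ (bs : List Char) (cur : List (String × String))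
    (seen t : List String),
    (∀ s : String, (sc, s) ∈ cur ↔ s ∈ seen) →
    pvDed bs seen = seen ++ t →
    pvInner sc bs cur = cur ++ t.map (fun y => (sc, y)) := by
  intro bs
  induction bs with
  | nil =>
    intro cur seen t _ hd
    have hd' : seen = seen ++ t := by simpa [pvDed] using hd
    have hlen := congrArg List.length hd'
    simp only [List.length_append] at hlen
    have ht : t = [] := List.eq_nil_of_length_eq_zero (by omega)
    simp [pvInner, ht]
  | cons d bs ih =>
    intro cur seen t hcur hd
    rw [pvInner_cons]
    by_cases hdd : d = '-'
    · rw [if_neg (by simp [hdd])]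
      rw [pvDed_cons, if_neg (by simp [hdd])] at hd
      exact ih cur seen t hcur hd
    · rw [if_pos hdd]
      rw [pvDed_cons, if_pos hdd] at hd
      by_cases hm : String.ofList [d] ∈ seen
      · have hin : (sc, String.ofList [d]) ∈ cur := (hcur _).mpr hm
        rw [if_neg (not_not_intro hin)]
        rw [if_neg (not_not_intro hm)] at hd
        exact ih cur seen t hcur hd
      · have hnin : (sc, String.ofList [d]) ∉ cur := fun h => hm ((hcur _).mp h)
        rw [if_pos hnin]
        rw [if_pos hm] at hd
        obtain ⟨t', ht'⟩ := pvDed_prefix bs (seen ++ [String.ofList [d]])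
        have heq : seen ++ ([String.ofList [d]] ++ t') = seen ++ t := by
          have := ht'.symm.trans hd
          simpa [List.append_assoc] using this
        have htt : t = String.ofList [d] :: t' := (List.append_cancel_left heq).symm
        rw [ih (cur ++ [(sc, String.ofList [d])]) (seen ++ [String.ofList [d]]) t'
            (by intro s; simp [hcur s]) ht', htt]
        simp

-- outer loop: starting from the product xs × ys, folding A's body over `as`
-- yields the product (pvDed as xs) × ys, where ys = pvDed bs []
lemma pvOuter (bs : List Char) : ∀ (as_ : List Char) (xs : List String),
    as_.foldl (fun combs c =>
        if c ≠ '-' then pvInner (String.ofList [c]) bs combs else combs)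
      (xs.flatMap (fun x => (pvDed bs []).map (fun y => (x, y))))
    = (pvDed as_ xs).flatMap (fun x => (pvDed bs []).map (fun y => (x, y))) := by
  intro as_
  induction as_ with
  | nil => intro xs; simp [pvDed]
  | cons c as_ ih =>
    intro xs
    simp only [List.foldl_cons]
    rw [pvDed_cons]
    by_cases hc : c = '-'
    · rw [if_neg (by simp [hc]), if_neg (by simp [hc])]; exact ih xs
    · rw [if_pos hc, if_pos hc]
      by_cases hm : String.ofList [c] ∈ xs
      · have hcur : ∀ s : String,
            (String.ofList [c], s) ∈ xs.flatMap (fun x => (pvDed bs []).map (fun y => (x, y)))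
            ↔ s ∈ pvDed bs [] := by
          intro s
          simp only [List.mem_flatMap, List.mem_map]
          constructor
          · rintro ⟨x, _, y, hy, h⟩
            obtain ⟨h1, h2⟩ := Prod.mk.injEq .. ▸ h
            exact h2 ▸ hy
          · intro hs; exact ⟨String.ofList [c], hm, s, hs, rfl⟩
        have hstep := pvInner_eq (String.ofList [c]) bs _ (pvDed bs []) [] hcur
          (by simpa using pvDed_idem bs [])
        rw [hstep, if_neg (not_not_intro hm)]
        simpa using ih xs
      · have hcur : ∀ s : String,
            (String.ofList [c], s) ∈ xs.flatMap (fun x => (pvDed bs []).map (fun y => (x, y)))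
            ↔ s ∈ ([] : List String) := by
          intro s
          simp only [List.mem_flatMap, List.mem_map, List.not_mem_nil, iff_false]
          rintro ⟨x, hx, y, hy, h⟩
          obtain ⟨h1, h2⟩ := Prod.mk.injEq .. ▸ h
          exact hm (h1 ▸ hx)
        have hstep := pvInner_eq (String.ofList [c]) bs _ [] (pvDed bs []) hcur (by simp)
        rw [hstep, if_pos hm]
        have h2 : xs.flatMap (fun x => (pvDed bs []).map (fun y => (x, y)))
              ++ (pvDed bs []).map (fun y => (String.ofList [c], y))
            = (xs ++ [String.ofList [c]]).flatMap
                (fun x => (pvDed bs []).map (fun y => (x, y))) := by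
          simp
        rw [h2]; exact ih (xs ++ [String.ofList [c]])

-- ===== VERDICT (by name: the statement is the Claim_ definition above) =====
theorem possibleCombs_spec : Claim_equal_possibleCombs := by
  intro a b _
  show possibleCombs a b = possibleCombs_alt a b
  have := pvOuter b.toList a.toList []
  simpa [possibleCombs, possibleCombs_alt] using this
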